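-- pv_equiv track=rewrite | github.com/dchou1618/pyeng | Algorithms/magicsquares.py | makeMagicSquare
-- ===== SOURCE A (Python) =====
-- def createBoard(n):
--     result = []
--     for row in range(n):
--         result.append([None]*n)
--     return result
--
-- def makeMagicSquare(n,start,d):
--     arithProgress = list(range(start,n*n+1,d))
--     if n%2 == 0: return None
--
--     board = createBoard(n)
--     startingPosition = n//2
--     index,row,col = 0,0,startingPosition
--     lastRow = True
--     board[0][startingPosition] = arithProgress[index]
--     index += 1
--
--     while index < len(arithProgress):
--         # follows algorithm of filling in square with subsequent number
--         # by moving up-right. If not a valid move, move down to next column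
--         # or wraparound to first col. If moved to occupied cell, then
--         # move down
--         row -= 1
--         col += 1
--         if row < 0:
--             if col >= len(board[0]):
--                 row += 2
--                 col -= 1
--                 board[row][col] = arithProgress[index]
--             else:
--                 row = len(board)-1
--                 if board[row][col] != None:
--                     row = 1
--                 board[row][col]=arithProgress[index]
--         elif col >= len(board[0]):
--             col = 0
--             if board[row][col] != None:
--                 row += 1
--             board[row][col]=arithProgress[index]
--         else:
--             if board[row][col] == None:
--                 board[row][col] = arithProgress[index]
--             else:
--                 row += 2
--                 col -= 1
--                 board[row][col] = arithProgress[index]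
--         index += 1
--     return board
-- ===== SOURCE B (Python) =====
-- # B: direct per-cell closed form for the Siamese magic-square construction
-- # (no board mutation, no walk): cell (i,j) holds the progression value whose
-- # rank is k = n*((i+j-half)%n) + (i+2j-2*half)%n, half = n//2.
-- def makeMagicSquare(n, start, d):
--     if n % 2 == 0:
--         return None
--     nums = list(range(start, n * n + 1, d))
--     half = n // 2
--     return [[nums[n * ((i + j - half) % n) + (i + 2 * j - 2 * half) % n]
--              for j in range(n)]
--             for i in range(n)]
-- ===== Notes on version B (the rewrite author's own statement) =====
-- stated objective: alternative
-- what changed: B replaces A's step-by-step Siamese walk over a mutable board (move up-right, branch on wraparound/occupied cells) with a direct per-cell closed form (cell (i,j) takes the progression value of rank n*((i+j-n//2)%n) + (i+2j-2*(n//2))%n); Pre_ additionally excludes odd-n inputs whose progression does not fill the board exactly, because A then returns a board containing None entries, which is not a value of the declared List[List[int]] cell type.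
-- outside the precondition, e.g. on makeMagicSquare(3, 2, 1): A returns [[9, 2, 7], [4, 6, 8], [5, None, 3]], B raises IndexError
import Mathlib
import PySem

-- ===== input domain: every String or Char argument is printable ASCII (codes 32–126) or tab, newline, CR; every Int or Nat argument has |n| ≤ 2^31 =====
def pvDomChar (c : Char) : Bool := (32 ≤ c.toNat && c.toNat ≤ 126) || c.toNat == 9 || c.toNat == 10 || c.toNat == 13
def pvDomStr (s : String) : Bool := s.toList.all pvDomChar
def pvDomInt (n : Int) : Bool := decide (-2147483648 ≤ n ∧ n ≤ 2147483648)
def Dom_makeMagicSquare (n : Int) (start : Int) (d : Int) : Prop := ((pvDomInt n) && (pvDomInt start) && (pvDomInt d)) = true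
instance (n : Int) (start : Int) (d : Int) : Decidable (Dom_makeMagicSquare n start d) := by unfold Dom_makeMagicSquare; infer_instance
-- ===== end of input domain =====

-- B replaces A's step-by-step Siamese walk over a mutable board with a direct per-cell
-- closed form; equivalence is proved on the inputs where A returns a fully-filled board
-- (or the even-n None) — see Pre_ below.

-- ===== PORT A =====
-- Board cells are Option Int (Python None = none).  arithProgress[0] is read with a
-- pyGetD default (exact whenever the progression is nonempty, which Pre_ guarantees) and
-- the final board is returned through mapM (exact whenever the board is completely
-- filled, which Pre_ guarantees; a board still containing None is not a value of the
-- declared cell type Int and those inputs are outside Pre_).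

def mmsGet (b : List (List (Option Int))) (i j : Int) : Option Int :=
  PySem.List.pyGetD (PySem.List.pyGetD b i []) j none

def mmsSet (b : List (List (Option Int))) (i j : Int) (v : Int) : List (List (Option Int)) :=
  PySem.List.pySetD b i (PySem.List.pySetD (PySem.List.pyGetD b i []) j (some v))

def mmsCreateBoard (n : Int) : List (List (Option Int)) :=
  (PySem.List.pyRange 0 n 1).foldl
    (fun acc _ => acc ++ [List.replicate n.toNat (none : Option Int)]) []

def mmsStep (st : List (List (Option Int)) × Int × Int) (v : Int) :
    List (List (Option Int)) × Int × Int :=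
  match st with
  | (b, row0, col0) =>
    let row := row0 - 1
    let col := col0 + 1
    if row < 0 then
      if ((PySem.List.pyGetD b 0 []).length : Int) ≤ col then
        (mmsSet b (row + 2) (col - 1) v, row + 2, col - 1)
      else
        let row1 : Int := (b.length : Int) - 1
        let row2 : Int := if mmsGet b row1 col ≠ none then 1 else row1
        (mmsSet b row2 col v, row2, col)
    else if ((PySem.List.pyGetD b 0 []).length : Int) ≤ col then
      let row2 : Int := if mmsGet b row 0 ≠ none then row + 1 else row
      (mmsSet b row2 0 v, row2, 0)
    else
      if mmsGet b row col = none then (mmsSet b row col v, row, col)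
      else (mmsSet b (row + 2) (col - 1) v, row + 2, col - 1)

def makeMagicSquare (n : Int) (start : Int) (d : Int) : Option (List (List Int)) :=
  let arith := PySem.List.pyRange start (n * n + 1) d
  if PySem.Int.mod n 2 == 0 then none
  else
    let sp := PySem.Int.floordiv n 2
    let b0 := mmsSet (mmsCreateBoard n) 0 sp (PySem.List.pyGetD arith 0 0)
    let res := (arith.drop 1).foldl mmsStep (b0, 0, sp)
    res.1.mapM (fun r => r.mapM id)

-- ===== PORT B =====
-- nums[k] is read with a pyGetD default (exact whenever the index is in range, which
-- Pre_ guarantees for every cell).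
def makeMagicSquare_alt (n : Int) (start : Int) (d : Int) : Option (List (List Int)) :=
  if PySem.Int.mod n 2 == 0 then none
  else
    let nums := PySem.List.pyRange start (n * n + 1) d
    let half := PySem.Int.floordiv n 2
    some ((PySem.List.pyRange 0 n 1).map (fun i =>
      (PySem.List.pyRange 0 n 1).map (fun j =>
        PySem.List.pyGetD nums
          (n * PySem.Int.mod (i + j - half) n + PySem.Int.mod (i + 2 * j - 2 * half) n) 0)))

-- ===== PRECONDITION & SPEC =====
-- Pre_ excludes d = 0 (range() raises ValueError) and, for odd n, the inputs where A
-- raises IndexError (n < 1, empty progression, progression longer than n*n) or returns a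
-- partially-filled board containing None (progression shorter than n*n), which is not a
-- value of the declared cell type int.
def Pre_makeMagicSquare (n : Int) (start : Int) (d : Int) : Prop :=
  d ≠ 0 ∧ (PySem.Int.mod n 2 = 0 ∨
    (1 ≤ n ∧
      (if 0 < d then (if start < n * n + 1 then ((n * n + 1 - start + d - 1) / d).toNat else 0)
       else (if n * n + 1 < start then ((start - (n * n + 1) + -d - 1) / -d).toNat else 0))
        = (n * n).toNat))
instance (n : Int) (start : Int) (d : Int) : Decidable (Pre_makeMagicSquare n start d) := by
  unfold Pre_makeMagicSquare; infer_instance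

def pvWitness_makeMagicSquare : Int × Int × Int := (3, 1, 1)

def Spec_makeMagicSquare (n : Int) (start : Int) (d : Int) (out : Option (List (List Int))) : Prop :=
  out = makeMagicSquare_alt n start d
instance (n : Int) (start : Int) (d : Int) (out : Option (List (List Int))) :
    Decidable (Spec_makeMagicSquare n start d out) := by
  unfold Spec_makeMagicSquare; infer_instance

-- ===== CLAIM =====
def Claim_equal_makeMagicSquare : Prop :=
  ∀ (n : Int) (start : Int) (d : Int), Dom_makeMagicSquare n start d →
    Pre_makeMagicSquare n start d →
    Spec_makeMagicSquare n start d (makeMagicSquare n start d)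

-- ===== LEMMAS AND PROOFS =====

-- closed-form index of a cell and closed-form position of an index
def mmsIdx (n half i j : Int) : Int :=
  n * ((i + j - half) % n) + (i + 2 * j - 2 * half) % n
def mmsR (n k : Int) : Int := (2 * (k / n) - k % n) % n
def mmsC (n half k : Int) : Int := (half + k % n - k / n) % n

def mmsTab (n : Int) (g : Int → Int → Option Int) : List (List (Option Int)) :=
  (PySem.List.pyRange 0 n 1).map (fun i => (PySem.List.pyRange 0 n 1).map (fun j => g i j))

-- board state after the first k values have been placed
def mmsBd (n half start d k : Int) : List (List (Option Int)) :=
  mmsTab n (fun i j =>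
    if mmsIdx n half i j < k then some (start + d * mmsIdx n half i j) else none)

lemma pyR0 (n : Int) : PySem.List.pyRange 0 n 1 = (List.range n.toNat).map (fun k : Nat => (k : Int)) := by
  rw [PySem.List.pyRange_one]
  simp only [sub_zero, zero_add]

lemma emod3 (n a : Int) (hn : 0 < n) (h1 : -n ≤ a) (h2 : a < 2 * n) :
    a % n = a ∨ a % n = a + n ∨ a % n = a - n := by
  rcases lt_or_ge a 0 with h | h
  · right; left
    rw [show a % n = (a + n) % n from (Int.add_emod_right a n).symm,
        Int.emod_eq_of_lt (by omega) (by omega)]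
  · rcases lt_or_ge a n with h2' | h2'
    · left; exact Int.emod_eq_of_lt h h2'
    · right; right
      rw [show a % n = (a - n) % n from (Int.sub_emod_right a n).symm,
          Int.emod_eq_of_lt (by omega) (by omega)]

lemma divmod_of (n q r a : Int) (hn : 0 < n) (h : a = n * q + r) (h0 : 0 ≤ r) (h1 : r < n) :
    a / n = q ∧ a % n = r :=
  (Int.ediv_emod_unique hn).mpr ⟨by omega, h0, h1⟩

lemma emod_bounds (n a : Int) (hn : 0 < n) : 0 ≤ a % n ∧ a % n < n :=
  ⟨Int.emod_nonneg a (by omega), Int.emod_lt_of_pos a hn⟩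

lemma mmsIdx_bounds (n half i j : Int) (hn : 0 < n) :
    0 ≤ mmsIdx n half i j ∧ mmsIdx n half i j < n * n := by
  have e1 := emod_bounds n (i + j - half) hn
  have e2 := emod_bounds n (i + 2 * j - 2 * half) hn
  have h1 : n * ((i + j - half) % n) ≤ n * (n - 1) :=
    mul_le_mul_of_nonneg_left (by omega) hn.le
  have h2 : 0 ≤ n * ((i + j - half) % n) := mul_nonneg hn.le e1.1
  have h3 : n * (n - 1) = n * n - n := by ring
  unfold mmsIdx; omega

lemma mms_inv1 (n half i j : Int) (hodd : n = 2 * half + 1) (hh : 0 ≤ half)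
    (hi0 : 0 ≤ i) (hi1 : i < n) (hj0 : 0 ≤ j) (hj1 : j < n) :
    mmsR n (mmsIdx n half i j) = i ∧ mmsC n half (mmsIdx n half i j) = j := by
  have hn : 0 < n := by omega
  have hAb := emod_bounds n (i + j - half) hn
  have hBb := emod_bounds n (i + 2 * j - 2 * half) hn
  have hA3 := emod3 n (i + j - half) hn (by omega) (by omega)
  have hB3 := emod3 n (i + 2 * j - 2 * half) hn (by omega) (by omega)
  have hdm := divmod_of n ((i + j - half) % n) ((i + 2 * j - 2 * half) % n)
      (mmsIdx n half i j) hn rfl hBb.1 hBb.2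
  unfold mmsR mmsC
  rw [hdm.1, hdm.2]
  have hR3 := emod3 n (2 * ((i + j - half) % n) - (i + 2 * j - 2 * half) % n) hn
      (by omega) (by omega)
  have hRb := emod_bounds n (2 * ((i + j - half) % n) - (i + 2 * j - 2 * half) % n) hn
  have hC3 := emod3 n (half + (i + 2 * j - 2 * half) % n - (i + j - half) % n) hn
      (by omega) (by omega)
  have hCb := emod_bounds n (half + (i + 2 * j - 2 * half) % n - (i + j - half) % n) hn
  constructor
  · rcases hA3 with hA | hA | hA <;> rcases hB3 with hB | hB | hB <;>
      rcases hR3 with hR | hR | hR <;> omega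
  · rcases hA3 with hA | hA | hA <;> rcases hB3 with hB | hB | hB <;>
      rcases hC3 with hC | hC | hC <;> omega

lemma mms_inv2 (n half k : Int) (hodd : n = 2 * half + 1) (hh : 0 ≤ half)
    (hk0 : 0 ≤ k) (hk1 : k < n * n) :
    mmsIdx n half (mmsR n k) (mmsC n half k) = k := by
  have hn : 0 < n := by omega
  have hXY : n * (k / n) + k % n = k := Int.ediv_add_emod k n
  have hYb := emod_bounds n k hn
  have hX0 : 0 ≤ k / n := Int.ediv_nonneg hk0 hn.le
  have hXn : k / n < n := by
    by_contra hcon; push_neg at hcon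
    have := mul_le_mul_of_nonneg_left hcon hn.le
    omega
  unfold mmsIdx mmsR mmsC
  set X := k / n with hXdef
  set Y := k % n with hYdef
  have hr3 := emod3 n (2 * X - Y) hn (by omega) (by omega)
  have hrb := emod_bounds n (2 * X - Y) hn
  have hc3 := emod3 n (half + Y - X) hn (by omega) (by omega)
  have hcb := emod_bounds n (half + Y - X) hn
  have hA1 : ((2 * X - Y) % n + (half + Y - X) % n - half) % n = X := by
    have h13 := emod3 n ((2 * X - Y) % n + (half + Y - X) % n - half) hn
        (by omega) (by omega)
    have h13b := emod_bounds n ((2 * X - Y) % n + (half + Y - X) % n - half) hn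
    rcases hr3 with hR | hR | hR <;> rcases hc3 with hC | hC | hC <;>
      rcases h13 with h1 | h1 | h1 <;> omega
  have hA2 : ((2 * X - Y) % n + 2 * ((half + Y - X) % n) - 2 * half) % n = Y := by
    have h23 := emod3 n ((2 * X - Y) % n + 2 * ((half + Y - X) % n) - 2 * half) hn
        (by omega) (by omega)
    have h23b := emod_bounds n ((2 * X - Y) % n + 2 * ((half + Y - X) % n) - 2 * half) hn
    rcases hr3 with hR | hR | hR <;> rcases hc3 with hC | hC | hC <;>
      rcases h23 with h1 | h1 | h1 <;> omega
  rw [hA1, hA2]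
  exact hXY

-- board-shape lemmas
lemma length_mmsTab (n : Int) (g : Int → Int → Option Int) :
    (mmsTab n g).length = n.toNat := by
  simp [mmsTab, pyR0]

lemma row0_mmsTab (n : Int) (g : Int → Int → Option Int) (hn : 0 < n) :
    PySem.List.pyGetD (mmsTab n g) 0 [] = (PySem.List.pyRange 0 n 1).map (fun j => g 0 j) := by
  exact PySem.List.pyGetD_map_pyRange_of_nonneg _ n 0 [] le_rfl hn

lemma width_mmsTab (n : Int) (g : Int → Int → Option Int) (hn : 0 < n) :
    ((PySem.List.pyGetD (mmsTab n g) 0 []).length : Int) = n := by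
  rw [row0_mmsTab n g hn]
  simp [pyR0, Int.toNat_of_nonneg hn.le]

lemma mmsGet_tab (n : Int) (g : Int → Int → Option Int) (i j : Int)
    (hi0 : 0 ≤ i) (hi1 : i < n) (hj0 : 0 ≤ j) (hj1 : j < n) :
    mmsGet (mmsTab n g) i j = g i j := by
  unfold mmsGet mmsTab
  rw [PySem.List.pyGetD_map_pyRange_of_nonneg _ n i [] hi0 hi1,
      PySem.List.pyGetD_map_pyRange_of_nonneg _ n j none hj0 hj1]

lemma mmsSet_tab (n : Int) (g : Int → Int → Option Int) (i j v : Int)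
    (hi0 : 0 ≤ i) (hi1 : i < n) (hj0 : 0 ≤ j) (hj1 : j < n) :
    mmsSet (mmsTab n g) i j v
      = mmsTab n (fun i' j' => if i' = i ∧ j' = j then some v else g i' j') := by
  unfold mmsSet
  rw [show PySem.List.pyGetD (mmsTab n g) i []
        = (PySem.List.pyRange 0 n 1).map (fun j' => g i j') from
      PySem.List.pyGetD_map_pyRange_of_nonneg _ n i [] hi0 hi1]
  rw [PySem.List.pySetD_of_nonneg _ _ hj0, PySem.List.pySetD_of_nonneg _ _ hi0]
  unfold mmsTab
  apply List.ext_getElem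
  · simp
  · intro idx h1 h2
    rw [List.getElem_set]
    have hidxlt : idx < n.toNat := by simpa using h2
    split_ifs with hcase
    · have hidx : (idx : Int) = i := by omega
      rw [List.getElem_map]
      apply List.ext_getElem
      · simp
      · intro jdx g1 g2
        have hjdxlt : jdx < n.toNat := by simpa using g2
        have hjr : jdx < (PySem.List.pyRange 0 n 1).length := by
          simpa [PySem.List.length_pyRange_one] using hjdxlt
        rw [List.getElem_set, List.getElem_map, List.getElem_map,
            PySem.List.getElem_pyRange_one, PySem.List.getElem_pyRange_one]
        simp only [zero_add]
        rw [hidx]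
        by_cases hjj : j.toNat = jdx
        · have : (jdx : Int) = j := by omega
          rw [if_pos hjj, if_pos ⟨rfl, this⟩]
        · have : ¬ ((jdx : Int) = j) := by omega
          rw [if_neg hjj, if_neg (by tauto : ¬ (i = i ∧ (jdx : Int) = j))]
    · rw [List.getElem_map, List.getElem_map]
      have hir : idx < (PySem.List.pyRange 0 n 1).length := by
        simpa [PySem.List.length_pyRange_one] using hidxlt
      rw [PySem.List.getElem_pyRange_one]
      simp only [zero_add]
      have hne : ¬ ((idx : Int) = i) := by omega
      refine List.map_congr_left (fun j' _ => ?_)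
      rw [if_neg (by tauto : ¬ ((idx : Int) = i ∧ j' = j))]

lemma mmsTab_congr (n : Int) (g g' : Int → Int → Option Int)
    (h : ∀ i j, 0 ≤ i → i < n → 0 ≤ j → j < n → g i j = g' i j) :
    mmsTab n g = mmsTab n g' := by
  unfold mmsTab
  refine List.map_congr_left (fun i hi => ?_)
  rw [PySem.List.mem_pyRange_one] at hi
  refine List.map_congr_left (fun j hj => ?_)
  rw [PySem.List.mem_pyRange_one] at hj
  exact h i j hi.1 hi.2 hj.1 hj.2

lemma mmsCreateBoard_eq (n : Int) :
    mmsCreateBoard n = mmsTab n (fun _ _ => none) := by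
  unfold mmsCreateBoard mmsTab
  rw [PySem.List.foldl_append_singleton_eq_map]
  simp only [List.nil_append]
  refine List.map_congr_left (fun i _ => ?_)
  rw [pyR0, List.map_map]
  show List.replicate n.toNat (none : Option Int) = (List.range n.toNat).map (fun _ : Nat => (none : Option Int))
  rw [List.map_const', List.length_range]

lemma mmsGet_bd (n half start d k i j : Int) (hi0 : 0 ≤ i) (hi1 : i < n)
    (hj0 : 0 ≤ j) (hj1 : j < n) :
    mmsGet (mmsBd n half start d k) i j
      = if mmsIdx n half i j < k then some (start + d * mmsIdx n half i j) else none :=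
  mmsGet_tab n _ i j hi0 hi1 hj0 hj1

-- writing value k at its closed-form cell advances the board by one stage
lemma mmsBd_write (n half start d k i j : Int) (hodd : n = 2 * half + 1) (hh : 0 ≤ half)
    (hk0 : 0 ≤ k) (hk1 : k < n * n)
    (hi0 : 0 ≤ i) (hi1 : i < n) (hj0 : 0 ≤ j) (hj1 : j < n)
    (hidx : mmsIdx n half i j = k) :
    mmsSet (mmsBd n half start d k) i j (start + d * k) = mmsBd n half start d (k + 1) := by
  unfold mmsBd
  rw [mmsSet_tab n _ i j (start + d * k) hi0 hi1 hj0 hj1]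
  apply mmsTab_congr
  intro i' j' h1 h2 h3 h4
  by_cases hc : i' = i ∧ j' = j
  · rcases hc with ⟨rfl, rfl⟩
    have hlt : mmsIdx n half i' j' < k + 1 := by omega
    rw [if_pos ⟨rfl, rfl⟩, if_pos hlt, hidx]
  · rw [if_neg hc]
    have hne : mmsIdx n half i' j' ≠ k := by
      intro he
      have p1 := mms_inv1 n half i' j' hodd hh h1 h2 h3 h4
      have p2 := mms_inv1 n half i j hodd hh hi0 hi1 hj0 hj1
      rw [he] at p1; rw [hidx] at p2
      exact hc ⟨p1.1.symm.trans p2.1, p1.2.symm.trans p2.2⟩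
    have hiff : (mmsIdx n half i' j' < k + 1) ↔ (mmsIdx n half i' j' < k) := by omega
    simp only [hiff]

-- one iteration of A's while loop = one stage of the closed form
lemma mmsStep_bd (n half start d k : Int) (hodd : n = 2 * half + 1) (hh : 0 ≤ half)
    (hk1 : 1 ≤ k) (hk2 : k < n * n) :
    mmsStep (mmsBd n half start d k, mmsR n (k - 1), mmsC n half (k - 1)) (start + d * k)
      = (mmsBd n half start d (k + 1), mmsR n k, mmsC n half k) := by
  have hn : 0 < n := by omega
  have hn1 : 1 < n := by
    by_contra hcon
    have hne : n = 1 := by omega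
    rw [hne] at hk2; norm_num at hk2; omega
  have hw : ((PySem.List.pyGetD (mmsBd n half start d k) 0 []).length : Int) = n :=
    width_mmsTab n _ hn
  have hblen : ((mmsBd n half start d k).length : Int) = n := by
    rw [show (mmsBd n half start d k).length = n.toNat from length_mmsTab n _]
    omega
  have hXY : n * ((k - 1) / n) + (k - 1) % n = k - 1 := Int.ediv_add_emod (k - 1) n
  have hYb := emod_bounds n (k - 1) hn
  have hX0 : 0 ≤ (k - 1) / n := Int.ediv_nonneg (by omega) hn.le
  have hXn : (k - 1) / n < n := by
    by_contra hcon; push_neg at hcon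
    have := mul_le_mul_of_nonneg_left hcon hn.le
    omega
  unfold mmsR mmsC
  simp only [mmsStep]
  rw [hw, hblen]
  set X := (k - 1) / n with hXdef
  set Y := (k - 1) % n with hYdef
  have hr3 := emod3 n (2 * X - Y) hn (by omega) (by omega)
  have hrb := emod_bounds n (2 * X - Y) hn
  have hc3 := emod3 n (half + Y - X) hn (by omega) (by omega)
  have hcb := emod_bounds n (half + Y - X) hn
  by_cases hYtop : Y = n - 1
  · -- end of a block of n values: the up-right cell is where value k-n went
    have hX1 : X + 1 < n := by
      by_contra hcon; push_neg at hcon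
      have h := mul_le_mul_of_nonneg_left hcon hn.le
      rw [mul_add, mul_one] at h; omega
    have hdm : k / n = X + 1 ∧ k % n = 0 :=
      divmod_of n (X + 1) 0 k hn (by rw [mul_add, mul_one]; omega) le_rfl hn
    rw [hdm.1, hdm.2]
    by_cases hXh : X = half
    · -- double wraparound corner
      have hr0 : (2 * X - Y) % n = 0 := by rcases hr3 with h | h | h <;> omega
      have hcn1 : (half + Y - X) % n = n - 1 := by rcases hc3 with h | h | h <;> omega
      rw [hr0, hcn1]
      rw [if_pos (by omega : (0 : Int) - 1 < 0), if_pos (by omega : n ≤ n - 1 + 1)]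
      have hbR := emod_bounds n (2 * (X + 1) - 0) hn
      have hRk : (2 * (X + 1) - 0) % n = 1 := by
        have h := emod3 n (2 * (X + 1) - 0) hn (by omega) (by omega)
        rcases h with h | h | h <;> omega
      have hbC := emod_bounds n (half + 0 - (X + 1)) hn
      have hCk : (half + 0 - (X + 1)) % n = n - 1 := by
        have h := emod3 n (half + 0 - (X + 1)) hn (by omega) (by omega)
        rcases h with h | h | h <;> omega
      rw [hRk, hCk]
      have hmr : mmsR n k = 1 := by unfold mmsR; rw [hdm.1, hdm.2]; exact hRk
      have hmc : mmsC n half k = n - 1 := by unfold mmsC; rw [hdm.1, hdm.2]; exact hCk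
      have hidx : mmsIdx n half 1 (n - 1) = k := by
        rw [← hmc, ← hmr]; exact mms_inv2 n half k hodd hh (by omega) hk2
      have e1 : (0 : Int) - 1 + 2 = 1 := by norm_num
      have e2 : n - 1 + 1 - 1 = n - 1 := by ring
      rw [e1, e2,
        mmsBd_write n half start d k 1 (n - 1) hodd hh (by omega) hk2 (by omega)
          (by omega) (by omega) (by omega) hidx]
    · -- collision: the up-right cell already holds value n*X
      have hrpos : 0 < (2 * X - Y) % n := by rcases hr3 with h | h | h <;> omega
      have hcne : (half + Y - X) % n < n - 1 := by rcases hc3 with h | h | h <;> omega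
      rw [if_neg (by omega : ¬ ((2 * X - Y) % n - 1 < 0)),
          if_neg (by omega : ¬ (n ≤ (half + Y - X) % n + 1))]
      have hdm0 : (n * X) / n = X ∧ (n * X) % n = 0 :=
        divmod_of n X 0 (n * X) hn (by ring) le_rfl hn
      have hprev : mmsIdx n half ((2 * X - Y) % n - 1) ((half + Y - X) % n + 1) = n * X := by
        have h1 : mmsR n (n * X) = (2 * X - Y) % n - 1 := by
          unfold mmsR; rw [hdm0.1, hdm0.2]
          have hb := emod_bounds n (2 * X - 0) hn
          have h := emod3 n (2 * X - 0) hn (by omega) (by omega)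
          rcases hr3 with h' | h' | h' <;> rcases h with h'' | h'' | h'' <;> omega
        have h2 : mmsC n half (n * X) = (half + Y - X) % n + 1 := by
          unfold mmsC; rw [hdm0.1, hdm0.2]
          have hb := emod_bounds n (half + 0 - X) hn
          have h := emod3 n (half + 0 - X) hn (by omega) (by omega)
          rcases hc3 with h' | h' | h' <;> rcases h with h'' | h'' | h'' <;> omega
        rw [← h1, ← h2]
        exact mms_inv2 n half (n * X) hodd hh (mul_nonneg hn.le hX0)
          (by have := mul_lt_mul_of_pos_left hXn hn; omega)
      have hocc : ¬ (mmsGet (mmsBd n half start d k) ((2 * X - Y) % n - 1)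
          ((half + Y - X) % n + 1) = none) := by
        rw [mmsGet_bd n half start d k _ _ (by omega) (by omega) (by omega) (by omega),
            hprev, if_pos (by omega : n * X < k)]
        simp
      rw [if_neg hocc]
      have hbR := emod_bounds n (2 * (X + 1) - 0) hn
      have hRk : (2 * (X + 1) - 0) % n = (2 * X - Y) % n + 1 := by
        have h := emod3 n (2 * (X + 1) - 0) hn (by omega) (by omega)
        rcases hr3 with h' | h' | h' <;> rcases h with h'' | h'' | h'' <;> omega
      have hbC := emod_bounds n (half + 0 - (X + 1)) hn
      have hCk : (half + 0 - (X + 1)) % n = (half + Y - X) % n := by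
        have h := emod3 n (half + 0 - (X + 1)) hn (by omega) (by omega)
        rcases hc3 with h' | h' | h' <;> rcases h with h'' | h'' | h'' <;> omega
      rw [hRk, hCk]
      have hmr : mmsR n k = (2 * X - Y) % n + 1 := by
        unfold mmsR; rw [hdm.1, hdm.2]; exact hRk
      have hmc : mmsC n half k = (half + Y - X) % n := by
        unfold mmsC; rw [hdm.1, hdm.2]; exact hCk
      have hidx : mmsIdx n half ((2 * X - Y) % n + 1) ((half + Y - X) % n) = k := by
        rw [← hmr, ← hmc]; exact mms_inv2 n half k hodd hh (by omega) hk2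
      have e1 : (2 * X - Y) % n - 1 + 2 = (2 * X - Y) % n + 1 := by ring
      have e2 : (half + Y - X) % n + 1 - 1 = (half + Y - X) % n := by ring
      rw [e1, e2,
        mmsBd_write n half start d k ((2 * X - Y) % n + 1) ((half + Y - X) % n) hodd hh
          (by omega) hk2 (by omega) (by omega) (by omega) (by omega) hidx]
  · -- inside a block: the up-right cell is exactly the target cell
    have hdm : k / n = X ∧ k % n = Y + 1 :=
      divmod_of n X (Y + 1) k hn (by omega) (by omega) (by omega)
    rw [hdm.1, hdm.2]
    by_cases hr0 : (2 * X - Y) % n = 0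
    · -- row wraps to the bottom
      have hd : 2 * X - Y = 0 ∨ 2 * X - Y = n := by rcases hr3 with h | h | h <;> omega
      have hcne : (half + Y - X) % n < n - 1 := by rcases hc3 with h | h | h <;> omega
      rw [hr0]
      rw [if_pos (by omega : (0 : Int) - 1 < 0),
          if_neg (by omega : ¬ (n ≤ (half + Y - X) % n + 1))]
      have hbR := emod_bounds n (2 * X - (Y + 1)) hn
      have hRk : (2 * X - (Y + 1)) % n = n - 1 := by
        have h := emod3 n (2 * X - (Y + 1)) hn (by omega) (by omega)
        rcases h with h | h | h <;> omega
      have hbC := emod_bounds n (half + (Y + 1) - X) hn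
      have hCk : (half + (Y + 1) - X) % n = (half + Y - X) % n + 1 := by
        have h := emod3 n (half + (Y + 1) - X) hn (by omega) (by omega)
        rcases hc3 with h' | h' | h' <;> rcases h with h'' | h'' | h'' <;> omega
      rw [hRk, hCk]
      have hmr : mmsR n k = n - 1 := by unfold mmsR; rw [hdm.1, hdm.2]; exact hRk
      have hmc : mmsC n half k = (half + Y - X) % n + 1 := by
        unfold mmsC; rw [hdm.1, hdm.2]; exact hCk
      have hidx : mmsIdx n half (n - 1) ((half + Y - X) % n + 1) = k := by
        rw [← hmr, ← hmc]; exact mms_inv2 n half k hodd hh (by omega) hk2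
      have hnocc : mmsGet (mmsBd n half start d k) (n - 1) ((half + Y - X) % n + 1) = none := by
        rw [mmsGet_bd n half start d k _ _ (by omega) (by omega) (by omega) (by omega),
            hidx, if_neg (by omega : ¬ (k < k))]
      rw [if_neg (by simp [hnocc] : ¬ ¬ (mmsGet (mmsBd n half start d k) (n - 1)
            ((half + Y - X) % n + 1) = none))]
      rw [mmsBd_write n half start d k (n - 1) ((half + Y - X) % n + 1) hodd hh (by omega)
        hk2 (by omega) (by omega) (by omega) (by omega) hidx]
    · -- no row wrap
      rw [if_neg (by omega : ¬ ((2 * X - Y) % n - 1 < 0))]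
      have hbR := emod_bounds n (2 * X - (Y + 1)) hn
      have hRk : (2 * X - (Y + 1)) % n = (2 * X - Y) % n - 1 := by
        have h := emod3 n (2 * X - (Y + 1)) hn (by omega) (by omega)
        rcases hr3 with h' | h' | h' <;> rcases h with h'' | h'' | h'' <;> omega
      have hmr : mmsR n k = (2 * X - Y) % n - 1 := by
        unfold mmsR; rw [hdm.1, hdm.2]; exact hRk
      by_cases hcn : (half + Y - X) % n = n - 1
      · -- column wraps to 0
        rw [if_pos (by omega : n ≤ (half + Y - X) % n + 1)]
        have hbC := emod_bounds n (half + (Y + 1) - X) hn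
        have hCk : (half + (Y + 1) - X) % n = 0 := by
          have h := emod3 n (half + (Y + 1) - X) hn (by omega) (by omega)
          rcases hc3 with h' | h' | h' <;> rcases h with h'' | h'' | h'' <;> omega
        have hmc : mmsC n half k = 0 := by unfold mmsC; rw [hdm.1, hdm.2]; exact hCk
        have hidx : mmsIdx n half ((2 * X - Y) % n - 1) 0 = k := by
          rw [← hmr, ← hmc]; exact mms_inv2 n half k hodd hh (by omega) hk2
        have hnocc : mmsGet (mmsBd n half start d k) ((2 * X - Y) % n - 1) 0 = none := by
          rw [mmsGet_bd n half start d k _ _ (by omega) (by omega) (by omega) (by omega),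
              hidx, if_neg (by omega : ¬ (k < k))]
        rw [if_neg (by simp [hnocc] : ¬ ¬ (mmsGet (mmsBd n half start d k)
              ((2 * X - Y) % n - 1) 0 = none))]
        rw [hRk, hCk]
        rw [mmsBd_write n half start d k ((2 * X - Y) % n - 1) 0 hodd hh (by omega) hk2
          (by omega) (by omega) (by omega) (by omega) hidx]
      · -- plain up-right move into a free cell
        rw [if_neg (by omega : ¬ (n ≤ (half + Y - X) % n + 1))]
        have hbC := emod_bounds n (half + (Y + 1) - X) hn
        have hCk : (half + (Y + 1) - X) % n = (half + Y - X) % n + 1 := by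
          have h := emod3 n (half + (Y + 1) - X) hn (by omega) (by omega)
          rcases hc3 with h' | h' | h' <;> rcases h with h'' | h'' | h'' <;> omega
        have hmc : mmsC n half k = (half + Y - X) % n + 1 := by
          unfold mmsC; rw [hdm.1, hdm.2]; exact hCk
        have hidx : mmsIdx n half ((2 * X - Y) % n - 1) ((half + Y - X) % n + 1) = k := by
          rw [← hmr, ← hmc]; exact mms_inv2 n half k hodd hh (by omega) hk2
        have hnocc : mmsGet (mmsBd n half start d k) ((2 * X - Y) % n - 1)
            ((half + Y - X) % n + 1) = none := by
          rw [mmsGet_bd n half start d k _ _ (by omega) (by omega) (by omega) (by omega),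
              hidx, if_neg (by omega : ¬ (k < k))]
        rw [if_pos hnocc]
        rw [hRk, hCk]
        rw [mmsBd_write n half start d k ((2 * X - Y) % n - 1) ((half + Y - X) % n + 1)
          hodd hh (by omega) hk2 (by omega) (by omega) (by omega) (by omega) hidx]

lemma mms_fold (n half start d : Int) (hodd : n = 2 * half + 1) (hh : 0 ≤ half) :
    ∀ (m a : Nat), 1 ≤ (a : Int) → (a : Int) + (m : Int) ≤ n * n →
    ((List.range' a m).map (fun k : Nat => start + d * (k : Int))).foldl mmsStep
        (mmsBd n half start d a, mmsR n ((a : Int) - 1), mmsC n half ((a : Int) - 1))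
      = (mmsBd n half start d ((a : Int) + (m : Int)),
         mmsR n ((a : Int) + (m : Int) - 1), mmsC n half ((a : Int) + (m : Int) - 1)) := by
  intro m
  induction m with
  | zero => intro a _ _; simp
  | succ m ih =>
    intro a ha hm
    rw [List.range'_succ, List.map_cons, List.foldl_cons]
    have hstep := mmsStep_bd n half start d a hodd hh ha (by push_cast at hm ⊢; omega)
    rw [hstep]
    have := ih (a + 1) (by push_cast; omega) (by push_cast at hm ⊢; omega)
    push_cast at this ⊢
    convert this using 3 <;> ring_nf

lemma mapM_map_some (l : List Int) : (l.map some).mapM (id : Option Int → Option Int) = some l := by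
  induction l with
  | nil => rfl
  | cons a t ih => simp [List.mapM_cons, ih]

lemma mapM_rows (f : Int → Int → Int) (R l : List Int) :
    (l.map (fun i => R.map (fun j => some (f i j)))).mapM
        (fun r => r.mapM (id : Option Int → Option Int))
      = some (l.map (fun i => R.map (f i))) := by
  induction l with
  | nil => rfl
  | cons a t ih =>
    have hrow : (R.map (fun j => some (f a j))).mapM (id : Option Int → Option Int)
        = some (R.map (f a)) := by
      rw [show R.map (fun j => some (f a j)) = (R.map (f a)).map some from
        (List.map_map).symm]
      exact mapM_map_some _
    simp [List.mapM_cons, hrow, ih]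

lemma mapM_bd_full (n half start d : Int) (hn : 0 < n)
    (hfull : ∀ i j, 0 ≤ i → i < n → 0 ≤ j → j < n → mmsIdx n half i j < n * n) :
    (mmsBd n half start d (n * n)).mapM (fun r => r.mapM id)
      = some ((PySem.List.pyRange 0 n 1).map (fun i =>
          (PySem.List.pyRange 0 n 1).map (fun j => start + d * mmsIdx n half i j))) := by
  have hb : mmsBd n half start d (n * n)
      = mmsTab n (fun i j => some (start + d * mmsIdx n half i j)) :=
    mmsTab_congr n _ _ (fun i j h1 h2 h3 h4 => by
      rw [if_pos (hfull i j h1 h2 h3 h4)])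
  rw [hb]
  unfold mmsTab
  exact mapM_rows (fun i j => start + d * mmsIdx n half i j) _ _

-- ===== VERDICT =====
theorem makeMagicSquare_spec : Claim_equal_makeMagicSquare := by
  intro n start d _ hPre
  obtain ⟨hd0, hcase⟩ := hPre
  unfold Spec_makeMagicSquare
  by_cases he : PySem.Int.mod n 2 == 0
  · simp only [makeMagicSquare, makeMagicSquare_alt, he, if_true]
  · have hbe : (PySem.Int.mod n 2 == 0) = false := by simpa using he
    have hmodne : ¬ (PySem.Int.mod n 2 = 0) := by simpa using he
    rcases hcase with h0 | ⟨hn1, hcnt⟩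
    · exact absurd h0 hmodne
    have hn : 0 < n := by omega
    have hmod2 : PySem.Int.mod n 2 = n % 2 := PySem.Int.mod_eq_emod_of_pos (by norm_num)
    have hhalfeq : PySem.Int.floordiv n 2 = n / 2 :=
      PySem.Int.floordiv_eq_ediv_of_pos (by norm_num)
    rw [hmod2] at hmodne
    have hodd : n = 2 * (n / 2) + 1 := by omega
    have hh : 0 ≤ n / 2 := by omega
    have hhn : n / 2 < n := by omega
    have hnn : 0 < n * n := mul_pos hn hn
    simp only [makeMagicSquare, makeMagicSquare_alt, hbe, Bool.false_eq_true, if_false]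
    rw [hhalfeq]
    -- the arithmetic progression is start, start+d, …, of length n*n
    have hlenN : (PySem.List.pyRange start (n * n + 1) d).length = (n * n).toNat := by
      unfold PySem.List.pyRange
      rw [if_neg hd0]
      simpa using hcnt
    have harith : PySem.List.pyRange start (n * n + 1) d
        = (List.range ((PySem.List.pyRange start (n * n + 1) d).length)).map
            (fun m : Nat => start + d * (m : Int)) := by
      unfold PySem.List.pyRange
      rw [if_neg hd0]
      simp
    rw [hlenN] at harith
    have hLpos : (n * n).toNat = ((n * n).toNat - 1) + 1 := by omega
    have hmr0 : mmsR n 0 = 0 := by unfold mmsR; simp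
    have hmc0 : mmsC n (n / 2) 0 = n / 2 := by
      unfold mmsC; simp [Int.emod_eq_of_lt hh hhn]
    have hv0 : PySem.List.pyGetD (PySem.List.pyRange start (n * n + 1) d) 0 0 = start := by
      rw [harith, hLpos, List.range_eq_range', List.range'_succ, List.map_cons,
          PySem.List.pyGetD_zero_cons]
      simp
    have hdrop : (PySem.List.pyRange start (n * n + 1) d).drop 1
        = (List.range' 1 ((n * n).toNat - 1)).map (fun m : Nat => start + d * (m : Int)) := by
      rw [harith, hLpos, List.range_eq_range', List.range'_succ, List.map_cons]
      simp
    have hb0 : mmsSet (mmsCreateBoard n) 0 (n / 2) start = mmsBd n (n / 2) start d 1 := by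
      rw [mmsCreateBoard_eq]
      rw [mmsSet_tab n _ 0 (n / 2) start le_rfl hn hh hhn]
      unfold mmsBd
      apply mmsTab_congr
      intro i j h1 h2 h3 h4
      have hiz : mmsIdx n (n / 2) 0 (n / 2) = 0 := by
        have h := mms_inv2 n (n / 2) 0 hodd hh le_rfl hnn
        rw [hmr0, hmc0] at h
        exact h
      by_cases hc : i = 0 ∧ j = n / 2
      · rcases hc with ⟨rfl, rfl⟩
        rw [if_pos ⟨rfl, rfl⟩, if_pos (by rw [hiz]; norm_num), hiz]
        norm_num
      · rw [if_neg hc]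
        have hne : mmsIdx n (n / 2) i j ≠ 0 := by
          intro heq
          have p := mms_inv1 n (n / 2) i j hodd hh h1 h2 h3 h4
          rw [heq, hmr0, hmc0] at p
          exact hc ⟨p.1.symm, p.2.symm⟩
        have hb := (mmsIdx_bounds n (n / 2) i j hn).1
        rw [if_neg (by omega : ¬ (mmsIdx n (n / 2) i j < 1))]
    have hfold1 : ((List.range' 1 ((n * n).toNat - 1)).map
          (fun m : Nat => start + d * (m : Int))).foldl mmsStep
          (mmsBd n (n / 2) start d 1, 0, n / 2)
        = (mmsBd n (n / 2) start d (n * n), mmsR n (n * n - 1), mmsC n (n / 2) (n * n - 1)) := by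
      have h := mms_fold n (n / 2) start d hodd hh ((n * n).toNat - 1) 1 (by norm_num)
        (by push_cast; omega)
      have hc1 : ((1 : Nat) : Int) = 1 := by norm_num
      rw [hc1] at h
      have hc2 : (1 : Int) + (((n * n).toNat - 1 : Nat) : Int) = n * n := by push_cast; omega
      rw [hc2] at h
      norm_num at h
      rw [hmr0, hmc0] at h
      exact h
    rw [hv0, hb0, hdrop, hfold1]
    rw [mapM_bd_full n (n / 2) start d hn
      (fun i j h1 h2 h3 h4 => (mmsIdx_bounds n (n / 2) i j hn).2)]
    refine congrArg some (List.map_congr_left fun i hi => ?_)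
    rw [PySem.List.mem_pyRange_one] at hi
    refine List.map_congr_left fun j hj => ?_
    rw [PySem.List.mem_pyRange_one] at hj
    simp only [PySem.Int.mod_eq_emod_of_pos hn]
    have hbnd := mmsIdx_bounds n (n / 2) i j hn
    rw [harith,
        show n * ((i + j - n / 2) % n) + (i + 2 * j - 2 * (n / 2)) % n
          = mmsIdx n (n / 2) i j from rfl,
        PySem.List.pyGetD_eq_getElem _ 0 hbnd.1
          (by simp only [List.length_map, List.length_range]; omega)]
    simp only [List.getElem_map, List.getElem_range]
    rw [Int.toNat_of_nonneg hbnd.1]
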